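-- pv_equiv track=rewrite | github.com/stupid-learner/Arithmetic_Error_Probing | arithmetic_error_probing/generate_response_and_activation/get_model_response_gsm8k.py | is_valid_equation
-- ===== SOURCE A (Python) =====
-- def is_valid_equation(equation):
--     if any(op in equation for op in ['-', '*', '/']):
--         return False
--
--     left_side = equation.split('=')[0].strip()
--
--     plus_count = left_side.count('+')
--
--     if plus_count > 1:
--         return False
--
--     return True
-- ===== SOURCE B (Python) =====
-- def is_valid_equation(equation):
--     left = True
--     plus = 0
--     for c in equation:
--         if c in '-*/':
--             return False
--         if c == '=':
--             left = False
--         elif c == '+' and left: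
--             plus += 1
--     return plus <= 1
-- ===== Notes on version B (the rewrite author's own statement) =====
-- stated objective: simpler
-- what changed: Replaces A's three separate scans (an any() over forbidden operators, a split at the equals sign plus strip, then a substring count of plus signs) with a single pass over the characters maintaining a left-side flag and a running plus count.
import Mathlib
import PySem

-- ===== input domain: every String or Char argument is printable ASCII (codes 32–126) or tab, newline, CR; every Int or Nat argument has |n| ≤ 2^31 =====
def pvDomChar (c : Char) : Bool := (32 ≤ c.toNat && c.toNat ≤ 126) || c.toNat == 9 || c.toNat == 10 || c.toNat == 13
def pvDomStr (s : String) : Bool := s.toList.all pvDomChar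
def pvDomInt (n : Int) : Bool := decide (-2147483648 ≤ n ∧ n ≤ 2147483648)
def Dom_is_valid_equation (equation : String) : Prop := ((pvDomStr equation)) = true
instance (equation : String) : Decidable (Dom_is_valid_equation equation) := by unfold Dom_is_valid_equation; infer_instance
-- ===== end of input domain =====

-- B replaces A's three scans (any() over operators, split('='), count('+')) by one pass
-- over the characters with a left-side flag and a running plus count (objective: simpler).

-- ===== PORT A =====
def is_valid_equation (equation : String) : Bool :=
  if ["-", "*", "/"].any (fun op => PySem.Str.isIn op equation) then false
  else
    let left_side : String :=
      PySem.Str.strip (PySem.List.pyGetD ((PySem.Str.split? equation "=").getD []) 0 "")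
    let plus_count := PySem.Str.count left_side "+"
    if plus_count > 1 then false else true

-- ===== PORT B =====
def altGo (left : Bool) (k : Nat) : List Char → Bool
  | [] => decide (k ≤ 1)
  | c :: rest =>
    if c = '-' ∨ c = '*' ∨ c = '/' then false
    else if c = '=' then altGo false k rest
    else if c = '+' ∧ left = true then altGo left (k + 1) rest
    else altGo left k rest

def is_valid_equation_alt (equation : String) : Bool :=
  altGo true 0 equation.toList

-- ===== PRECONDITION & SPEC =====
def Spec_is_valid_equation (equation : String) (out : Bool) : Prop := out = is_valid_equation_alt equation
instance (equation : String) (out : Bool) : Decidable (Spec_is_valid_equation equation out) := by unfold Spec_is_valid_equation; infer_instance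

-- ===== CLAIM (what is proved, stated in full; the proofs are below) =====
def Claim_equal_is_valid_equation : Prop := ∀ (equation : String), Dom_is_valid_equation equation → Spec_is_valid_equation equation (is_valid_equation equation)

-- ===== LEMMAS AND PROOFS =====

-- 'c in s' for a single character is membership in the char list
theorem isIn_single (c : Char) (l : List Char) :
    PySem.Chars.isIn [c] l = true ↔ c ∈ l := by
  rw [PySem.Chars.isIn_iff_infix, List.singleton_infix_iff]

-- count.go with a single-character needle is List.count
theorem countGo_singleton (c : Char) (l : List Char) (fuel acc : Nat)
    (h : l.length ≤ fuel) :
    PySem.Chars.count.go [c] fuel l acc = acc + l.count c := by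
  induction l generalizing fuel acc with
  | nil => cases fuel <;> simp [PySem.Chars.count.go]
  | cons x t ih =>
    cases fuel with
    | zero => simp at h
    | succ f =>
      simp only [PySem.Chars.count.go, List.isPrefixOf]
      by_cases hx : c = x
      · subst hx
        simp only [BEq.rfl, Bool.true_and, if_pos]
        rw [show List.drop (List.length [c]) (c :: t) = t from by simp,
          ih f (acc + 1) (by simpa using Nat.le_of_succ_le_succ h)]
        simp
        omega
      · have : (c == x) = false := by simp [hx]
        simp only [this, Bool.false_and, if_neg Bool.false_ne_true]
        rw [ih f acc (by simpa using Nat.le_of_succ_le_succ h)]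
        simp [Ne.symm hx]

theorem count_singleton (l : List Char) (c : Char) :
    PySem.Chars.count l [c] = l.count c := by
  simp only [PySem.Chars.count]
  split
  · rename_i hempty
    simp at hempty
  · rw [countGo_singleton c l l.length 0 (le_refl _)]
    omega

-- splitOn.go prepends acc.reverse to its result
theorem splitOnGo_acc (sep : List Char) (fuel : Nat) (l cur acc : List Char)
    (accs : List (List Char)) :
    ∃ tail, PySem.Chars.splitOn.go sep fuel l cur (acc :: accs) =
      (acc :: accs).reverse ++ tail := by
  induction fuel generalizing l cur acc accs with
  | zero => exact ⟨[cur.reverse ++ l], by simp [PySem.Chars.splitOn.go]⟩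
  | succ f ih =>
    cases l with
    | nil => exact ⟨[cur.reverse], by simp [PySem.Chars.splitOn.go]⟩
    | cons x t =>
      simp only [PySem.Chars.splitOn.go]
      split
      · obtain ⟨tail, htail⟩ := ih (List.drop sep.length (x :: t)) [] cur.reverse (acc :: accs)
        exact ⟨cur.reverse :: tail, by simp [htail]⟩
      · exact ih t (x :: cur) acc accs

-- head of splitOn.go on '=' with empty accumulator: chars before the first '='
theorem splitOnGo_head (fuel : Nat) (l cur : List Char) (h : l.length ≤ fuel) :
    ∃ tail, PySem.Chars.splitOn.go ['='] fuel l cur [] =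
      (cur.reverse ++ l.takeWhile (fun c => c != '=')) :: tail := by
  induction l generalizing fuel cur with
  | nil => cases fuel <;> exact ⟨[], by simp [PySem.Chars.splitOn.go]⟩
  | cons x t ih =>
    cases fuel with
    | zero => simp at h
    | succ f =>
      simp only [PySem.Chars.splitOn.go, List.isPrefixOf]
      by_cases hx : x = '='
      · subst hx
        simp only [BEq.rfl, Bool.true_and, if_pos]
        obtain ⟨tail, htail⟩ := splitOnGo_acc ['='] f t [] cur.reverse []
        refine ⟨tail, ?_⟩
        rw [show List.drop (List.length ['=']) ('=' :: t) = t from by simp, htail]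
        simp [List.takeWhile]
      · have hb : ('=' == x) = false := by simp [Ne.symm hx]
        simp only [hb, Bool.false_and, if_neg Bool.false_ne_true]
        obtain ⟨tail, htail⟩ := ih f (x :: cur) (by simpa using Nat.le_of_succ_le_succ h)
        refine ⟨tail, ?_⟩
        rw [htail]
        have h1 : (x != '=') = true := by simp [hx]
        simp [List.takeWhile, h1]

theorem splitOn_head (l : List Char) :
    ∃ tail, PySem.Chars.splitOn l ['='] =
      (l.takeWhile (fun c => c != '=')) :: tail := by
  simpa using splitOnGo_head (l.length + 1) l [] (by omega)

-- stripping whitespace does not change the number of '+'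
theorem count_dropWhile_isspace (l : List Char) :
    (l.dropWhile PySem.Chars.isspace).count '+' = l.count '+' := by
  conv_rhs => rw [← List.takeWhile_append_dropWhile (p := PySem.Chars.isspace) (l := l)]
  rw [List.count_append]
  have : (l.takeWhile PySem.Chars.isspace).count '+' = 0 := by
    rw [List.count_eq_zero]
    intro hmem
    have := List.mem_takeWhile_imp hmem
    simp [PySem.Chars.isspace] at this
  omega

theorem count_strip (l : List Char) :
    (PySem.Chars.strip l).count '+' = l.count '+' := by
  simp only [PySem.Chars.strip, PySem.Chars.rstrip, PySem.Chars.lstrip]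
  rw [List.count_reverse, count_dropWhile_isspace, List.count_reverse,
    count_dropWhile_isspace]

-- characterisation of B's single pass
theorem altGo_spec (cs : List Char) (k : Nat) (left : Bool) :
    altGo left k cs =
      (!('-' ∈ cs ∨ '*' ∈ cs ∨ '/' ∈ cs) &&
        decide (k + (if left then (cs.takeWhile (fun c => c != '=')).count '+' else 0) ≤ 1)) := by
  induction cs generalizing k left with
  | nil => cases left <;> simp [altGo]
  | cons c rest ih =>
    by_cases hforb : c = '-' ∨ c = '*' ∨ c = '/'
    · rw [show altGo left k (c :: rest) = false from by simp [altGo, hforb]]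
      have hb : decide ('-' ∈ c :: rest ∨ '*' ∈ c :: rest ∨ '/' ∈ c :: rest) = true :=
        decide_eq_true (by rcases hforb with h | h | h <;> simp [h])
      rw [hb]
      rfl
    · have hmem : ('-' ∈ c :: rest ∨ '*' ∈ c :: rest ∨ '/' ∈ c :: rest) ↔
          ('-' ∈ rest ∨ '*' ∈ rest ∨ '/' ∈ rest) := by
        simp only [List.mem_cons]
        constructor
        · rintro ((h | h) | (h | h) | (h | h))
          · exact absurd (Or.inl h.symm) hforb
          · exact Or.inl h
          · exact absurd (Or.inr (Or.inl h.symm)) hforb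
          · exact Or.inr (Or.inl h)
          · exact absurd (Or.inr (Or.inr h.symm)) hforb
          · exact Or.inr (Or.inr h)
        · rintro (h | h | h)
          · exact Or.inl (Or.inr h)
          · exact Or.inr (Or.inl (Or.inr h))
          · exact Or.inr (Or.inr (Or.inr h))
      by_cases heq : c = '='
      · subst heq
        rw [show altGo left k ('=' :: rest) = altGo false k rest by
          simp [altGo]]
        rw [ih k false]
        simp only [hmem]
        cases left <;> simp [List.takeWhile]
      · by_cases hplus : c = '+' ∧ left = true
        · obtain ⟨hc, hl⟩ := hplus
          subst hc; subst hl
          rw [show altGo true k ('+' :: rest) = altGo true (k + 1) rest by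
            simp [altGo, heq]]
          rw [ih (k + 1) true]
          simp only [hmem]
          have : (('+' : Char) != '=') = true := by decide
          simp only [List.takeWhile, this, if_true, List.count_cons, BEq.rfl, if_true]
          congr 1
          simp
          omega
        · rw [show altGo left k (c :: rest) = altGo left k rest by
            simp only [altGo, if_neg hforb, if_neg heq, if_neg hplus]]
          rw [ih k left]
          simp only [hmem]
          cases left with
          | false => rfl
          | true =>
            have hc : c ≠ '+' := fun h => hplus ⟨h, rfl⟩
            have h1 : (c != '=') = true := by simp [heq]
            simp only [List.takeWhile, h1, if_true, List.count_cons, if_true]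
            have : (c == '+') = false := by simp [hc]
            simp [this]

-- ===== VERDICT (by name: the statement is the Claim_ definition above) =====
theorem is_valid_equation_spec : Claim_equal_is_valid_equation := by
  intro equation _
  unfold Spec_is_valid_equation is_valid_equation is_valid_equation_alt
  rw [altGo_spec]
  have hA : (["-", "*", "/"].any fun op => PySem.Str.isIn op equation) =
      decide ('-' ∈ equation.toList ∨ '*' ∈ equation.toList ∨ '/' ∈ equation.toList) := by
    rw [Bool.eq_iff_iff]
    simp [isIn_single]
  by_cases hP : ('-' ∈ equation.toList ∨ '*' ∈ equation.toList ∨ '/' ∈ equation.toList)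
  · rw [hA, if_pos (by simp [hP])]
    simp [hP]
  · rw [hA, if_neg (by simp [hP])]
    dsimp only
    obtain ⟨tail, htail⟩ := splitOn_head equation.toList
    have hparts : (PySem.Str.split? equation "=").getD [] =
        (PySem.Chars.splitOn equation.toList ['=']).map String.ofList := by
      simp [PySem.Str.split?, PySem.Chars.split?]
    have hcount : PySem.Str.count
        (PySem.Str.strip (PySem.List.pyGetD ((PySem.Str.split? equation "=").getD []) 0 "")) "+" =
        (equation.toList.takeWhile (fun c => c != '=')).count '+' := by
      rw [hparts, htail, PySem.List.pyGetD_zero]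
      simp only [List.map_cons, List.getD_cons_zero]
      rw [PySem.Str.count_eq, PySem.Str.toList_strip]
      have h1 : (String.ofList (equation.toList.takeWhile (fun c => c != '='))).toList =
          equation.toList.takeWhile (fun c => c != '=') := by simp
      rw [h1]
      have h2 : ("+" : String).toList = ['+'] := rfl
      rw [h2, count_singleton, count_strip]
    rw [hcount]
    by_cases hle : (equation.toList.takeWhile (fun c => c != '=')).count '+' ≤ 1
    · rw [if_neg (by omega)]
      simp [hP, hle]
    · rw [if_pos (by omega)]
      simp [hP, hle]
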